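-- pv_equiv track=rewrite | github.com/42ibaran/gomoku_v2 | algo/test.py | get_small_patterns
-- ===== SOURCE A (Python) =====
-- patterns = [0, 0, 0, 0, 0, 0, 0, 0, 19683, 45927, 2187, 58320, 223074, 19683, 59049, 177147, 0, 0, 0, 0, 0, 0, 0, 0, 0, 0, 756, 81, 104490, 24786, 10935, 4374, 0, 0, 0, 0, 0, 0, 0, 0, 0, 0, 0, 0, 0, 0, 0, 0, 27, 0, 81, 729, 243, 1458, 5103, 4374, 43740, 29889, 0, 0, 0, 0, 0, 0, 0, 0, 0, 0, 0, 0, 0, 0, 0, 0, 0, 0, 0, 0, 0, 0, 0, 0, 0, 0, 0, 0, 0, 0, 0, 0, 0, 0, 6561, 39366, 183708, 39366, 54675, 266814, 1458, 0, 0, 0, 0, 0, 0, 0, 0, 0, 0, 0, 0, 0]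
--
-- PATTERN_SIZES = [19] * 38 + \
--     (list(range(1, 20, 1)) + list(range(18, 0, -1))) * 2
--
-- def get_small_patterns(mask_size):
--     small_patterns = {}
--     for pattern_index, pattern in enumerate(patterns):
--         pattern_size = PATTERN_SIZES[pattern_index]
--         while pattern != 0:
--             if pattern_size < mask_size:
--                 break
--             small_pattern = pattern % 3**mask_size
--             if small_pattern != 0:
--                 small_patterns[small_pattern] = 1 if small_pattern not in small_patterns else small_patterns[small_pattern] + 1
--             pattern //= 3
--             pattern_size -= 1
--     return small_patterns
-- ===== SOURCE B (Python) =====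
-- patterns = [0, 0, 0, 0, 0, 0, 0, 0, 19683, 45927, 2187, 58320, 223074, 19683, 59049, 177147, 0, 0, 0, 0, 0, 0, 0, 0, 0, 0, 756, 81, 104490, 24786, 10935, 4374, 0, 0, 0, 0, 0, 0, 0, 0, 0, 0, 0, 0, 0, 0, 0, 0, 27, 0, 81, 729, 243, 1458, 5103, 4374, 43740, 29889, 0, 0, 0, 0, 0, 0, 0, 0, 0, 0, 0, 0, 0, 0, 0, 0, 0, 0, 0, 0, 0, 0, 0, 0, 0, 0, 0, 0, 0, 0, 0, 0, 0, 0, 6561, 39366, 183708, 39366, 54675, 266814, 1458, 0, 0, 0, 0, 0, 0, 0, 0, 0, 0, 0, 0, 0]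
--
-- PATTERN_SIZES = [19] * 38 + \
--     (list(range(1, 20, 1)) + list(range(18, 0, -1))) * 2
--
-- def get_small_patterns(mask_size):
--     counts = {}
--     for index, pattern in enumerate(patterns):
--         pattern_size = PATTERN_SIZES[index]
--         # materialize the base-3 digits of the pattern (little-endian)
--         digits = []
--         p = pattern
--         while p != 0:
--             p, r = divmod(p, 3)
--             digits.append(r)
--         n = len(digits)
--         if n == 0:
--             continue
--         last = min(pattern_size - mask_size, n - 1)
--         for t in range(last + 1):
--             val = sum(digits[t + i] * 3 ** i for i in range(mask_size) if t + i < n)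
--             if val != 0:
--                 counts[val] = counts.get(val, 0) + 1
--     return counts
-- ===== Notes on version B (the rewrite author's own statement) =====
-- stated objective: alternative
-- what changed: B materializes each pattern's base-3 digit list once (repeated divmod) and reads every window as a bounded sum of digits times powers of 3, instead of A's shrinking big-integer with repeated % 3**mask_size and //= 3.
-- outside the precondition, e.g. on get_small_patterns(-1000): A raises ZeroDivisionError, B returns {}
import Mathlib
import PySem

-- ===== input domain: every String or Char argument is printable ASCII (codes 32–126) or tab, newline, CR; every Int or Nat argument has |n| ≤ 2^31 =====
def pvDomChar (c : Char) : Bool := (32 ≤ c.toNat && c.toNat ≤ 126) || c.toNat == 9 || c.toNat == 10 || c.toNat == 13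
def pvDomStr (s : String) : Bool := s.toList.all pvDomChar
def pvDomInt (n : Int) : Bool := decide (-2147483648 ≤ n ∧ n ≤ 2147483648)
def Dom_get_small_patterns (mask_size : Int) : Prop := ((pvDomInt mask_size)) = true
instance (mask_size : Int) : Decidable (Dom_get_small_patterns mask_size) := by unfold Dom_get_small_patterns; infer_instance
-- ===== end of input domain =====

-- B replaces A's shrinking big-integer (% 3**mask_size, //= 3) by an explicit base-3 digit
-- list per pattern plus windowed digit sums; same counts, alternative decomposition.

-- module constant: patterns
def pvPatterns : List Int := [0, 0, 0, 0, 0, 0, 0, 0, 19683, 45927, 2187, 58320, 223074, 19683, 59049, 177147, 0, 0, 0, 0, 0, 0, 0, 0, 0, 0, 756, 81, 104490, 24786, 10935, 4374, 0, 0, 0, 0, 0, 0, 0, 0, 0, 0, 0, 0, 0, 0, 0, 0, 27, 0, 81, 729, 243, 1458, 5103, 4374, 43740, 29889, 0, 0, 0, 0, 0, 0, 0, 0, 0, 0, 0, 0, 0, 0, 0, 0, 0, 0, 0, 0, 0, 0, 0, 0, 0, 0, 0, 0, 0, 0, 0, 0, 0, 0, 6561, 39366, 183708, 39366, 54675, 266814,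 1458, 0, 0, 0, 0, 0, 0, 0, 0, 0, 0, 0, 0, 0]

-- module constant: PATTERN_SIZES = [19]*38 + (list(range(1,20,1)) + list(range(18,0,-1))) * 2
def pvPatternSizes : List Int :=
  List.replicate 38 (19 : Int) ++
    (let blk := PySem.List.pyRange 1 20 1 ++ PySem.List.pyRange 18 0 (-1)
     blk ++ blk)

-- ===== PORT A =====
-- A's while loop; fuel = pattern.toNat + 1 suffices since pattern ≥ 0 shrinks by //3 each step.
def pvLoopA (mask_size : Int) : Nat → Int → Int → PySem.Dict Int Int → PySem.Dict Int Int
  | 0, _, _, d => d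
  | fuel + 1, pattern, pattern_size, d =>
    if pattern = 0 then d
    else if pattern_size < mask_size then d
    else
      let small := PySem.Int.mod pattern ((3 : Int) ^ mask_size.toNat)
      let d' := if small ≠ 0 then
          d.insert small (if d.contains small = false then 1 else d.getD small 0 + 1)
        else d
      pvLoopA mask_size fuel (PySem.Int.floordiv pattern 3) (pattern_size - 1) d'

def get_small_patterns (mask_size : Int) : List (Int × Int) :=
  ((PySem.List.enumerate pvPatterns 0).foldl
    (fun d ip =>
      -- PATTERN_SIZES[pattern_index]: always in range for this fixed table (lengths match)
      let pattern_size := PySem.List.pyGetD pvPatternSizes ip.1 (0 : Int)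
      pvLoopA mask_size (ip.2.toNat + 1) ip.2 pattern_size d)
    PySem.Dict.empty).items

-- ===== PORT B =====
-- digits of p in base 3, little-endian; fuel = p.toNat + 1 suffices for p ≥ 0
def pvDigits : Nat → Int → List Int
  | 0, _ => []
  | fuel + 1, p =>
    if p = 0 then []
    else PySem.Int.mod p 3 :: pvDigits fuel (PySem.Int.floordiv p 3)

-- val = sum(digits[t+i] * 3**i for i in range(mask_size) if t+i < n)
def pvWindowVal (digits : List Int) (n t mask_size : Int) : Int :=
  ((PySem.List.pyRange 0 mask_size 1).map
    (fun i => if t + i < n then PySem.List.pyGetD digits (t + i) 0 * (3 : Int) ^ i.toNat else 0)).sum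

def get_small_patterns_alt (mask_size : Int) : List (Int × Int) :=
  ((PySem.List.enumerate pvPatterns 0).foldl
    (fun counts ip =>
      let pattern_size := PySem.List.pyGetD pvPatternSizes ip.1 (0 : Int)
      let digits := pvDigits (ip.2.toNat + 1) ip.2
      let n : Int := digits.length
      if n = 0 then counts
      else
        let last := min (pattern_size - mask_size) (n - 1)
        (PySem.List.pyRange 0 (last + 1) 1).foldl
          (fun counts t =>
            let val := pvWindowVal digits n t mask_size
            if val ≠ 0 then counts.insert val (counts.getD val 0 + 1) else counts)
          counts)
    PySem.Dict.empty).items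

-- ===== PRECONDITION & SPEC =====
-- Pre_ excludes negative mask_size, on which A's 3**mask_size is a float, so A returns a
-- dict with float keys — not a value of the declared int-keyed type.
def Pre_get_small_patterns (mask_size : Int) : Prop := 0 ≤ mask_size
instance (mask_size : Int) : Decidable (Pre_get_small_patterns mask_size) := by
  unfold Pre_get_small_patterns; infer_instance

def pvWitness_get_small_patterns : Int := 5

def Spec_get_small_patterns (mask_size : Int) (out : List (Int × Int)) : Prop :=
  out = get_small_patterns_alt mask_size
instance (mask_size : Int) (out : List (Int × Int)) : Decidable (Spec_get_small_patterns mask_size out) := by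
  unfold Spec_get_small_patterns; infer_instance

-- ===== CLAIM (what is proved, stated in full; the proofs are below) =====
def Claim_equal_get_small_patterns : Prop :=
  ∀ (mask_size : Int), Dom_get_small_patterns mask_size → Pre_get_small_patterns mask_size →
    Spec_get_small_patterns mask_size (get_small_patterns mask_size)

-- ===== LEMMAS AND PROOFS =====

-- foldl with a pointwise-identity step is the identity
theorem pv_foldl_id {α β : Type} (f : β → α → β) (l : List α)
    (h : ∀ b x, x ∈ l → f b x = b) : ∀ b, l.foldl f b = b := by
  induction l with
  | nil => intro b; rfl
  | cons x xs ih =>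
    intro b
    rw [List.foldl_cons, h b x (List.mem_cons_self), ih (fun b y hy => h b y (List.mem_cons_of_mem _ hy))]

-- every entry of PATTERN_SIZES is ≤ 19
theorem pv_sizes_le : ∀ x ∈ pvPatternSizes, x ≤ 19 := by decide

theorem pv_loopA_big {mask_size : Int} (h20 : 20 ≤ mask_size) :
    ∀ (fuel : Nat) (p ps : Int) (d : PySem.Dict Int Int), ps ≤ 19 → pvLoopA mask_size fuel p ps d = d := by
  intro fuel p ps d hps
  cases fuel with
  | zero => rfl
  | succ n =>
    unfold pvLoopA
    by_cases hp : p = 0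
    · simp [hp]
    · simp [hp, show ps < mask_size by omega]

theorem pv_getD_size_le (i : Int) : PySem.List.pyGetD pvPatternSizes i (0 : Int) ≤ 19 := by
  rcases h : PySem.List.pyGet? pvPatternSizes i with _ | v
  · have : PySem.List.pyGetD pvPatternSizes i (0 : Int) = 0 := by
      simp [PySem.List.pyGetD, h]
    omega
  · have hv : v ∈ pvPatternSizes := by exact PySem.List.mem_of_pyGet?_eq_some _ h
    have : PySem.List.pyGetD pvPatternSizes i (0 : Int) = v := by
      simp [PySem.List.pyGetD, h]
    rw [this]; exact pv_sizes_le v hv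

-- for mask_size ≥ 20 both sides return the empty dict's items
theorem pv_A_big {mask_size : Int} (h20 : 20 ≤ mask_size) : get_small_patterns mask_size = [] := by
  unfold get_small_patterns
  rw [pv_foldl_id _ _ (fun d ip _ => pv_loopA_big h20 _ _ _ d (pv_getD_size_le ip.1))]
  rfl

theorem pv_B_big {mask_size : Int} (h20 : 20 ≤ mask_size) : get_small_patterns_alt mask_size = [] := by
  unfold get_small_patterns_alt
  rw [pv_foldl_id]
  · rfl
  · intro d ip _
    by_cases hn : (((pvDigits (ip.2.toNat + 1) ip.2).length : Int)) = 0
    · simp [hn]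
    · have hps : PySem.List.pyGetD pvPatternSizes ip.1 (0 : Int) ≤ 19 := pv_getD_size_le ip.1
      have hlast : min (PySem.List.pyGetD pvPatternSizes ip.1 (0 : Int) - mask_size)
          (((pvDigits (ip.2.toNat + 1) ip.2).length : Int) - 1) + 1 ≤ 0 := by omega
      simp only [if_neg hn]
      rw [show PySem.List.pyRange 0
          (min (PySem.List.pyGetD pvPatternSizes ip.1 (0 : Int) - mask_size)
            (((pvDigits (ip.2.toNat + 1) ip.2).length : Int) - 1) + 1) 1 = [] from by
        simp [PySem.List.pyRange]; omega]
      rfl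

-- ===== VERDICT (by name: the statement is the Claim_ definition above) =====
set_option maxRecDepth 100000 in
set_option maxHeartbeats 2000000 in
theorem get_small_patterns_spec : Claim_equal_get_small_patterns := by
  intro mask_size _ hpre
  unfold Spec_get_small_patterns
  unfold Pre_get_small_patterns at hpre
  by_cases h : mask_size ≤ 19
  · interval_cases mask_size <;> decide
  · rw [pv_A_big (by omega), pv_B_big (by omega)]
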